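-- pv_equiv track=rewrite | github.com/hectorBrown/aoc2015 | day5.py | nice
-- ===== SOURCE A (Python) =====
-- vowels = ['a', 'e', 'i', 'o', 'u']
--
-- banned = ["ab", "cd", "pq", "xy"]
--
-- def nice(s):
--     if not sum([int(c in vowels) for c in s]) >= 3:
--         return False
--     double = False
--     last = s[0]
--     for c in s[1:]:
--         if c == last:
--             double = True
--         last = c
--     if not double:
--         return False
--     if any([b in s for b in banned]):
--         return False
--     return True
-- ===== SOURCE B (Python) =====
-- vowels = ['a', 'e', 'i', 'o', 'u']
--
-- banned = ["ab", "cd", "pq", "xy"]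
--
-- def nice(s):
--     count = 0
--     double = False
--     bad = False
--     last = None
--     for c in s:
--         if c in vowels:
--             count += 1
--         if last is not None:
--             if c == last:
--                 double = True
--             if last + c in banned:
--                 bad = True
--         last = c
--     return count >= 3 and double and not bad
-- ===== Notes on version B (the rewrite author's own statement) =====
-- stated objective: alternative
-- what changed: Replaced A's three separate scans (a list-comprehension vowel sum, a doubled-letter loop, and four 'b in s' substring searches) by one pass that tracks the previous character and maintains the vowel count, double flag and banned-pair flag together; the banned patterns are all length 2, so adjacency checking is exact.
import Mathlib
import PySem

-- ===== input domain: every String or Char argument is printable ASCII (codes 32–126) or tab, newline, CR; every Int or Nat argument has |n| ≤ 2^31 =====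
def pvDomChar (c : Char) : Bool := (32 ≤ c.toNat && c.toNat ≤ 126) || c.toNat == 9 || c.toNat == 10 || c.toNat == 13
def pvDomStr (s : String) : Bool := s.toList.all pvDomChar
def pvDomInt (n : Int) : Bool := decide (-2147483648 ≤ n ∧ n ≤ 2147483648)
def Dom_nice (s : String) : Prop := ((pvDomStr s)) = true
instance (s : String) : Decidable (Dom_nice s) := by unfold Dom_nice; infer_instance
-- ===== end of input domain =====

-- B folds A's three separate scans (vowel sum, doubled-letter loop, four substring tests)
-- into one pass over the string; same O(n) cost, one traversal instead of three.


def pvVowels : List Char := ['a', 'e', 'i', 'o', 'u']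
def pvBanned : List String := ["ab", "cd", "pq", "xy"]

-- ===== PORT A =====
def nice (s : String) : Bool :=
  -- sum([int(c in vowels) for c in s]) >= 3
  if ¬ ((s.toList.map (fun c => if c ∈ pvVowels then (1 : Int) else 0)).sum ≥ 3) then false
  else
    match s.toList with
    | [] => false  -- unreachable: the vowel sum ≥ 3 forces s nonempty (otherwise s[0] would raise)
    | x :: rest =>
      -- double = False; last = s[0]; for c in s[1:]: …
      let p := rest.foldl (fun (st : Bool × Char) c => (if c == st.2 then true else st.1, c)) (false, x)
      if ¬ p.1 then false
      else if pvBanned.any (fun b => PySem.Str.isIn b s) then false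
      else true

-- ===== PORT B =====
def pvBannedPairs : List (Char × Char) := [('a', 'b'), ('c', 'd'), ('p', 'q'), ('x', 'y')]

-- one pass: state = (vowel count, double seen, banned pair seen, previous char)
-- 'last + c in banned' is ported as pair membership: exact, every banned pattern has length 2
def nice_alt (s : String) : Bool :=
  let st := s.toList.foldl
    (fun (st : Int × Bool × Bool × Option Char) c =>
      let cnt := if c ∈ pvVowels then st.1 + 1 else st.1
      match st.2.2.2 with
      | none => (cnt, st.2.1, st.2.2.1, some c)
      | some l => (cnt, st.2.1 || (c == l), st.2.2.1 || decide ((l, c) ∈ pvBannedPairs), some c))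
    (0, false, false, none)
  decide (st.1 ≥ 3) && st.2.1 && !st.2.2.1

-- ===== PRECONDITION & SPEC =====
def Spec_nice (s : String) (out : Bool) : Prop := out = nice_alt s
instance (s : String) (out : Bool) : Decidable (Spec_nice s out) := by unfold Spec_nice; infer_instance

-- ===== CLAIM (what is proved, stated in full; the proofs are below) =====
def Claim_equal_nice : Prop := ∀ (s : String), Dom_nice s → Spec_nice s (nice s)

-- ===== LEMMAS AND PROOFS =====

-- 'double' as a recursive predicate: some char equals its predecessor, previous char x
def adjD : Char → List Char → Bool
  | _, [] => false
  | x, c :: l => (c == x) || adjD c l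

-- 'banned pair adjacent' as a recursive predicate
def adjB : Char → List Char → Bool
  | _, [] => false
  | x, c :: l => decide ((x, c) ∈ pvBannedPairs) || adjB c l

-- B's fold, once the first character has been absorbed
theorem b_fold (l : List Char) : ∀ (x : Char) (cnt : Int) (d b : Bool),
    l.foldl
      (fun (st : Int × Bool × Bool × Option Char) c =>
        let cnt := if c ∈ pvVowels then st.1 + 1 else st.1
        match st.2.2.2 with
        | none => (cnt, st.2.1, st.2.2.1, some c)
        | some lc => (cnt, st.2.1 || (c == lc), st.2.2.1 || decide ((lc, c) ∈ pvBannedPairs), some c))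
      (cnt, d, b, some x)
    = (cnt + ((l.countP (· ∈ pvVowels) : Nat) : Int), d || adjD x l, b || adjB x l, some (l.getLastD x)) := by
  induction l with
  | nil => intro x cnt d b; simp [adjD, adjB]
  | cons c t ih =>
    intro x cnt d b
    simp only [List.foldl_cons, List.countP_cons, adjD, adjB, ih c, List.getLastD_cons]
    refine congrArg₂ _ ?_ (congrArg₂ _ ?_ (congrArg₂ _ ?_ rfl))
    · by_cases h : c ∈ pvVowels <;> simp [h] <;> omega
    · simp [Bool.or_assoc]
    · simp [Bool.or_assoc]

-- A's doubled-letter loop computes adjD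
theorem a_fold (x : Char) (l : List Char) (d : Bool) :
    (l.foldl (fun (st : Bool × Char) c => (if c == st.2 then true else st.1, c)) (d, x)).1
    = (d || adjD x l) := by
  induction l generalizing x d with
  | nil => simp [adjD]
  | cons c t ih =>
    show (t.foldl _ ((if c == x then true else d), c)).1 = (d || adjD x (c :: t))
    rw [ih c]
    cases h : (c == x) <;> simp [adjD, h]

-- adjB finds exactly the banned pairs occurring adjacently, i.e. as 2-char infixes
theorem adjB_iff (x : Char) (l : List Char) :
    adjB x l = true ↔ ∃ p q, (p, q) ∈ pvBannedPairs ∧ [p, q] <:+: (x :: l) := by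
  induction l generalizing x with
  | nil =>
    simp only [adjB]
    constructor
    · intro h; cases h
    · rintro ⟨p, q, _, h⟩
      have := h.sublist.length_le
      simp at this
  | cons c t ih =>
    simp only [adjB, Bool.or_eq_true, decide_eq_true_eq, ih c]
    constructor
    · rintro (h | ⟨p, q, hm, hi⟩)
      · exact ⟨x, c, h, ⟨[], t, rfl⟩⟩
      · exact ⟨p, q, hm, List.infix_cons hi⟩
    · rintro ⟨p, q, hm, hi⟩
      rcases List.infix_cons_iff.1 hi with hpre | hinf
      · obtain ⟨t', ht⟩ := hpre
        simp only [List.cons_append, List.nil_append] at ht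
        injection ht with h1 h2
        injection h2 with h3 h4
        subst h1; subst h3
        exact Or.inl hm
      · exact Or.inr ⟨p, q, hm, hinf⟩

-- A's four substring tests find exactly the same pairs
theorem banned_any (s : String) :
    (pvBanned.any (fun b => PySem.Str.isIn b s)) = true
      ↔ ∃ p q, (p, q) ∈ pvBannedPairs ∧ [p, q] <:+: s.toList := by
  simp only [pvBanned, List.any_cons, List.any_nil, Bool.or_eq_true, Bool.or_false,
    PySem.Str.isIn_iff_infix]
  constructor
  · rintro (h | h | h | h)
    · exact ⟨'a', 'b', by simp [pvBannedPairs], h⟩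
    · exact ⟨'c', 'd', by simp [pvBannedPairs], h⟩
    · exact ⟨'p', 'q', by simp [pvBannedPairs], h⟩
    · exact ⟨'x', 'y', by simp [pvBannedPairs], h⟩
  · rintro ⟨p, q, hm, hi⟩
    simp only [pvBannedPairs, List.mem_cons, Prod.mk.injEq,
      List.not_mem_nil, or_false] at hm
    rcases hm with ⟨rfl, rfl⟩ | ⟨rfl, rfl⟩ | ⟨rfl, rfl⟩ | ⟨rfl, rfl⟩
    · exact Or.inl hi
    · exact Or.inr (Or.inl hi)
    · exact Or.inr (Or.inr (Or.inl hi))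
    · exact Or.inr (Or.inr (Or.inr hi))

-- A's vowel sum is the vowel count
theorem vowel_sum (l : List Char) :
    (l.map (fun c => if c ∈ pvVowels then (1 : Int) else 0)).sum
    = ((l.countP (· ∈ pvVowels) : Nat) : Int) := by
  induction l with
  | nil => simp
  | cons c t ih =>
    simp only [List.map_cons, List.sum_cons, List.countP_cons, ih]
    by_cases h : c ∈ pvVowels <;> simp [h] <;> omega

-- ===== VERDICT (by name: the statement is the Claim_ definition above) =====
theorem nice_spec : Claim_equal_nice := by
  intro s _
  unfold Spec_nice nice nice_alt
  cases hs : s.toList with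
  | nil => simp [hs]
  | cons x t =>
    simp only [hs, List.foldl_cons, vowel_sum]
    have hb := b_fold t x (if x ∈ pvVowels then (0 : Int) + 1 else 0) false false
    simp only [hb]
    have hcnt : (if x ∈ pvVowels then (0 : Int) + 1 else 0) + ((t.countP (· ∈ pvVowels) : Nat) : Int)
        = (((x :: t).countP (· ∈ pvVowels) : Nat) : Int) := by
      simp only [List.countP_cons]
      by_cases h : x ∈ pvVowels <;> simp [h] <;> omega
    rw [hcnt]
    by_cases h3 : (((x :: t).countP (· ∈ pvVowels) : Nat) : Int) ≥ 3
    · rw [if_neg (not_not_intro h3), a_fold]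
      simp only [Bool.false_or, decide_eq_true h3, Bool.true_and]
      cases hd : adjD x t with
      | false => simp [hd]
      | true =>
        simp only [hd, not_true, Bool.true_and]
        rw [if_neg (by simp)]
        by_cases hbn : (pvBanned.any (fun b => PySem.Str.isIn b s)) = true
        · have hB : adjB x t = true := (adjB_iff x t).2 (by rw [← hs]; exact (banned_any s).1 hbn)
          rw [if_pos hbn]; simp [hB]
        · have hB : adjB x t = false := by
            cases hAB : adjB x t
            · rfl
            · exact absurd ((banned_any s).2 (by rw [hs]; exact (adjB_iff x t).1 hAB)) hbn
          rw [if_neg hbn]; simp [hB]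
    · rw [if_pos h3]
      simp [h3]
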